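-- pv_equiv track=rewrite | github.com/MrBrantCode/unitest_baseline | mut_generate/mist_train_taco/taco_12097/solution.py | determine_game_outcome
-- ===== SOURCE A (Python) =====
-- def determine_game_outcome(n, A, B):
--     # Calculate the combined scores for each index
--     combined_scores = [A[i] + B[i] for i in range(n)]
--
--     # Initialize scores for both players
--     P1_score = 0
--     P2_score = 0
--
--     # Determine the optimal moves for both players
--     for _ in range(n):
--         # Find the index with the maximum combined score
--         max_index = combined_scores.index(max(combined_scores))
--
--         # Player P1 moves first
--         if _ % 2 == 0:
--             P1_score += A[max_index]
--         else:
--             P2_score += B[max_index]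
--
--         # Remove the chosen index from all lists
--         combined_scores.pop(max_index)
--         A.pop(max_index)
--         B.pop(max_index)
--
--     # Determine the outcome of the game
--     if P1_score > P2_score:
--         return "First"
--     elif P2_score > P1_score:
--         return "Second"
--     else:
--         return "Tie"
-- ===== SOURCE B (Python) =====
-- def determine_game_outcome(n, A, B):
--     # One sort by (-combined, index) replaces the repeated max/index/pop scans.
--     # Does not mutate A/B (the original pops its first n picks out of them).
--     order = sorted(range(n), key=lambda i: (-(A[i] + B[i]), i))
--     p1 = sum(A[i] for t, i in enumerate(order) if t % 2 == 0)
--     p2 = sum(B[i] for t, i in enumerate(order) if t % 2 == 1)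
--     if p1 > p2:
--         return "First"
--     if p2 > p1:
--         return "Second"
--     return "Tie"
-- ===== Notes on version B (the rewrite author's own statement) =====
-- stated objective: faster
-- what changed: Replaced the n rounds of max/index/pop scans over the shrinking combined-score list by a single stable sort of the indices by (-(A[i]+B[i]), i) followed by one alternating pass; B also leaves A and B unmutated (A pops its picks out of them).
import Mathlib
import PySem

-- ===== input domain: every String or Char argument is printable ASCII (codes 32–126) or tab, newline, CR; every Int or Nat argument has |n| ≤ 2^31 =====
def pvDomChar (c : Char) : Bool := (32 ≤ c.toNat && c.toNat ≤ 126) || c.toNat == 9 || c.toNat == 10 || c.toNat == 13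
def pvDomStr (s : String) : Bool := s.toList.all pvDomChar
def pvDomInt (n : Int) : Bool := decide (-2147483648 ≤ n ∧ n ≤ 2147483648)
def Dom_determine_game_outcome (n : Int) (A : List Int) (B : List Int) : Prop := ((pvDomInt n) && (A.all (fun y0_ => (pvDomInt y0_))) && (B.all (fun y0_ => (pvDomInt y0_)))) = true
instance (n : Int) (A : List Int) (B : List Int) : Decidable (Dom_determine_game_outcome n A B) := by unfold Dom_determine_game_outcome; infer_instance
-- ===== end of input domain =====

-- B replaces A's n rounds of max/index/pop scans by one stable sort of the indices
-- by (-(A[i]+B[i]), i) and a single alternating pass (objective: faster).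
-- Equivalence is about the RETURN value only: Python A pops its n picks out of the
-- caller's A and B lists, Python B leaves them untouched.

-- ===== PORT A =====
-- one iteration of A's `for _ in range(n)` loop; state = (combined_scores, A, B, P1_score, P2_score);
-- the `none` branches are unreachable under Pre_ (Python's max() would raise on an empty list)
def pvAStep (st : List Int × List Int × List Int × Int × Int) (t : Int) :
    List Int × List Int × List Int × Int × Int :=
  match PySem.List.max? st.1 (fun x => x) with
  | none => st
  | some m =>
    match PySem.List.index? st.1 m with
    | none => st
    | some j =>
      let p1' := if t % 2 == 0 then st.2.2.2.1 + PySem.List.pyGetD st.2.1 (j : Int) 0 else st.2.2.2.1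
      let p2' := if t % 2 == 0 then st.2.2.2.2 else st.2.2.2.2 + PySem.List.pyGetD st.2.2.1 (j : Int) 0
      (st.1.eraseIdx j, st.2.1.eraseIdx j, st.2.2.1.eraseIdx j, p1', p2')

def determine_game_outcome (n : Int) (A : List Int) (B : List Int) : String :=
  let combined := (PySem.List.pyRange 0 n).map
    (fun i => PySem.List.pyGetD A i 0 + PySem.List.pyGetD B i 0)
  let st := (PySem.List.pyRange 0 n).foldl pvAStep (combined, A, B, 0, 0)
  if st.2.2.2.1 > st.2.2.2.2 then "First"
  else if st.2.2.2.2 > st.2.2.2.1 then "Second"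
  else "Tie"

-- ===== PORT B =====
-- Python's tuple key (-(A[i]+B[i]), i) compares lexicographically: exactly Lex (Int × Int)
def pvKey (A B : List Int) (i : Int) : Lex (Int × Int) :=
  toLex (-(PySem.List.pyGetD A i 0 + PySem.List.pyGetD B i 0), i)

def determine_game_outcome_alt (n : Int) (A : List Int) (B : List Int) : String :=
  let order := PySem.List.sorted (PySem.List.pyRange 0 n) (pvKey A B)
  let p1 := (PySem.List.enumerate order 0).foldl
    (fun s p => if p.1 % 2 == 0 then s + PySem.List.pyGetD A p.2 0 else s) 0
  let p2 := (PySem.List.enumerate order 0).foldl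
    (fun s p => if p.1 % 2 == 1 then s + PySem.List.pyGetD B p.2 0 else s) 0
  if p1 > p2 then "First"
  else if p2 > p1 then "Second"
  else "Tie"

-- ===== PRECONDITION & SPEC =====
-- Pre_ excludes exactly the inputs where Python A raises IndexError: n larger than a list length
def Pre_determine_game_outcome (n : Int) (A : List Int) (B : List Int) : Prop :=
  n ≤ (A.length : Int) ∧ n ≤ (B.length : Int)
instance (n : Int) (A : List Int) (B : List Int) : Decidable (Pre_determine_game_outcome n A B) := by
  unfold Pre_determine_game_outcome; infer_instance

def pvWitness_determine_game_outcome : Int × List Int × List Int := (3, [1, 5, 2], [4, 0, 3])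

def Spec_determine_game_outcome (n : Int) (A : List Int) (B : List Int) (out : String) : Prop := out = determine_game_outcome_alt n A B
instance (n : Int) (A : List Int) (B : List Int) (out : String) : Decidable (Spec_determine_game_outcome n A B out) := by unfold Spec_determine_game_outcome; infer_instance

-- ===== CLAIM (what is proved, stated in full; the proofs are below) =====
def Claim_equal_determine_game_outcome : Prop := ∀ (n : Int) (A : List Int) (B : List Int), Dom_determine_game_outcome n A B → Pre_determine_game_outcome n A B → Spec_determine_game_outcome n A B (determine_game_outcome n A B)

-- ===== LEMMAS AND PROOFS =====

-- abstract pick list: A's greedy order, recursion on remaining original indices R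
def pvPick (c : Int → Int) : Nat → List Int → List Int
  | 0, _ => []
  | Nat.succ k, R =>
    match PySem.List.max? (R.map c) (fun x => x) with
    | none => []
    | some m =>
      match PySem.List.index? (R.map c) m with
      | none => []
      | some j => R.getD j 0 :: pvPick c k (R.eraseIdx j)

-- alternating accumulation of both scores along a pick list
def pvG (a b : Int → Int) : List Int → Int → Int → Int → Int × Int
  | [], _, p1, p2 => (p1, p2)
  | i :: rest, t, p1, p2 =>
    if t % 2 == 0 then pvG a b rest (t + 1) (p1 + a i) p2
    else pvG a b rest (t + 1) p1 (p2 + b i)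

def pvKeyOf (c : Int → Int) (i : Int) : Lex (Int × Int) := toLex (-(c i), i)

lemma pvGetD_prefix (a : Int → Int) (R At : List Int) (j : Nat) (hj : j < R.length) :
    PySem.List.pyGetD (R.map a ++ At) (j : Int) 0 = a (R.getD j 0) := by
  rw [PySem.List.pyGetD_natCast]
  rw [List.getD_eq_getElem _ _ (by simp; omega), List.getD_eq_getElem _ _ hj]
  rw [List.getElem_append_left (by simpa using hj)]
  simp

lemma pvPerm_cons_eraseIdx : ∀ (R : List Int) (j : Nat), j < R.length →
    (R.getD j 0 :: R.eraseIdx j).Perm R := by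
  intro R
  induction R with
  | nil => intro j hj; simp at hj
  | cons x R ih =>
    intro j hj
    cases j with
    | zero => simp
    | succ j =>
      simp only [List.getD_cons_succ, List.eraseIdx_cons_succ]
      exact (List.Perm.swap x _ _).trans ((ih j (by simpa using hj)).cons x)

-- A's loop over range(t, t+k) computes pvG over the pick list
lemma pvL1 (a b c : Int → Int) : ∀ (k : Nat) (R At Bt : List Int) (t p1 p2 : Int),
    R.length = k →
    ((PySem.List.pyRange t (t + (k : Int))).foldl pvAStep
        (R.map c, R.map a ++ At, R.map b ++ Bt, p1, p2)).2.2.2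
      = pvG a b (pvPick c k R) t p1 p2 := by
  intro k
  induction k with
  | zero =>
    intro R At Bt t p1 p2 hR
    have h0 : PySem.List.pyRange t (t + ((0 : Nat) : Int)) = [] :=
      List.eq_nil_of_length_eq_zero (by rw [PySem.List.length_pyRange_one]; omega)
    rw [h0]
    simp [pvPick, pvG]
  | succ k ih =>
    intro R At Bt t p1 p2 hR
    have hne : R.map c ≠ [] := by
      cases R with
      | nil => simp at hR
      | cons x xs => simp
    obtain ⟨m, hm⟩ : ∃ m, PySem.List.max? (R.map c) (fun x => x) = some m := by
      cases h : PySem.List.max? (R.map c) (fun x => x) with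
      | none => exact absurd ((PySem.List.max?_eq_none_iff _ _).mp h) hne
      | some m => exact ⟨m, rfl⟩
    obtain ⟨j, hj⟩ : ∃ j, PySem.List.index? (R.map c) m = some j := by
      have hmem := PySem.List.max?_mem hm
      have := (PySem.List.index?_isSome_iff (R.map c) m).mpr hmem
      cases h : PySem.List.index? (R.map c) m with
      | none => rw [h] at this; simp at this
      | some j => exact ⟨j, rfl⟩
    obtain ⟨hjlt, hjget, hjmin⟩ := PySem.List.getElem_of_index?_eq_some hj
    have hjR : j < R.length := by simpa using hjlt
    have hcons : PySem.List.pyRange t (t + ((k : Nat) + 1 : Int)) =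
        t :: PySem.List.pyRange (t + 1) ((t + 1) + (k : Int)) := by
      rw [show (t + ((k : Nat) + 1 : Int)) = ((t + 1) + ((k : Nat) : Int)) from by ring]
      rw [PySem.List.pyRange_one_cons (by omega)]
    rw [show ((Nat.succ k : Nat) : Int) = ((k : Nat) + 1 : Int) by push_cast; ring, hcons]
    rw [List.foldl_cons]
    have hstep : pvAStep (R.map c, R.map a ++ At, R.map b ++ Bt, p1, p2) t =
        ((R.eraseIdx j).map c, (R.eraseIdx j).map a ++ At, (R.eraseIdx j).map b ++ Bt,
          (if t % 2 == 0 then p1 + a (R.getD j 0) else p1),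
          (if t % 2 == 0 then p2 else p2 + b (R.getD j 0))) := by
      simp only [pvAStep, hm, hj]
      rw [List.eraseIdx_map, List.eraseIdx_append_of_lt_length (by simpa using hjR),
        List.eraseIdx_append_of_lt_length (by simpa using hjR),
        List.eraseIdx_map, List.eraseIdx_map]
      rw [pvGetD_prefix a R At j hjR, pvGetD_prefix b R Bt j hjR]
    rw [hstep]
    have hlen' : (R.eraseIdx j).length = k := by
      rw [List.length_eraseIdx, if_pos hjR]; omega
    rw [ih (R.eraseIdx j) At Bt (t + 1) _ _ hlen']
    have hpick : pvPick c (Nat.succ k) R = R.getD j 0 :: pvPick c k (R.eraseIdx j) := by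
      simp only [pvPick, hm, hj]
    rw [hpick]
    by_cases ht : t % 2 == 0 <;> simp [pvG, ht]

-- the pick list is the stable sort by (-(combined), index)
lemma pvL2 (c : Int → Int) : ∀ (k : Nat) (R : List Int), R.length = k →
    R.Pairwise (· < ·) →
    (pvPick c k R).Perm R ∧
      (pvPick c k R).Pairwise (fun x y => pvKeyOf c x < pvKeyOf c y) := by
  intro k
  induction k with
  | zero =>
    intro R hR _
    have : R = [] := List.eq_nil_of_length_eq_zero hR
    subst this
    simp [pvPick]
  | succ k ih =>
    intro R hR hpw
    have hne : R.map c ≠ [] := by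
      cases R with
      | nil => simp at hR
      | cons x xs => simp
    obtain ⟨m, hm⟩ : ∃ m, PySem.List.max? (R.map c) (fun x => x) = some m := by
      cases h : PySem.List.max? (R.map c) (fun x => x) with
      | none => exact absurd ((PySem.List.max?_eq_none_iff _ _).mp h) hne
      | some m => exact ⟨m, rfl⟩
    obtain ⟨j, hj⟩ : ∃ j, PySem.List.index? (R.map c) m = some j := by
      have hmem := PySem.List.max?_mem hm
      have := (PySem.List.index?_isSome_iff (R.map c) m).mpr hmem
      cases h : PySem.List.index? (R.map c) m with
      | none => rw [h] at this; simp at this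
      | some j => exact ⟨j, rfl⟩
    obtain ⟨hjlt, hjget, hjmin⟩ := PySem.List.getElem_of_index?_eq_some hj
    have hjR : j < R.length := by simpa using hjlt
    have hpick : pvPick c (Nat.succ k) R = R.getD j 0 :: pvPick c k (R.eraseIdx j) := by
      simp only [pvPick, hm, hj]
    have hlen' : (R.eraseIdx j).length = k := by
      rw [List.length_eraseIdx, if_pos hjR]; omega
    have hpw' : (R.eraseIdx j).Pairwise (· < ·) :=
      List.Pairwise.sublist (List.eraseIdx_sublist R j) hpw
    obtain ⟨ihperm, ihpw⟩ := ih (R.eraseIdx j) hlen' hpw'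
    rw [List.getD_eq_getElem _ _ hjR] at hpick
    have hcx : c R[j] = m := by simpa using hjget
    have hmax := PySem.List.max?_isMax hm
    have hhead : ∀ y ∈ R.eraseIdx j, pvKeyOf c R[j] < pvKeyOf c y := by
      intro y hy
      obtain ⟨l, hl, hlj, rfl⟩ := List.mem_eraseIdx_iff_getElem.mp hy
      have hyle : c R[l] ≤ m :=
        hmax (c R[l]) (List.mem_map.mpr ⟨R[l], List.getElem_mem hl, rfl⟩)
      rcases lt_or_eq_of_le hyle with hlt | heq
      · exact Prod.Lex.lt_iff.mpr (Or.inl (by show -(c R[j]) < -(c R[l]); omega))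
      · have hjl : j < l := by
          rcases Nat.lt_trichotomy l j with h | h | h
          · exact absurd (by simp [heq] : (R.map c)[l] = m) (hjmin l h)
          · exact absurd h hlj
          · exact h
        refine Prod.Lex.lt_iff.mpr (Or.inr ⟨?_, ?_⟩)
        · show -(c R[j]) = -(c R[l]); omega
        · show R[j] < R[l]
          exact List.pairwise_iff_getElem.mp hpw j l hjR hl hjl
    rw [hpick]
    have hpc := pvPerm_cons_eraseIdx R j hjR
    rw [List.getD_eq_getElem _ _ hjR] at hpc
    constructor
    · exact (ihperm.cons _).trans hpc
    · exact List.pairwise_cons.mpr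
        ⟨fun y hy => hhead y (ihperm.mem_iff.mp hy), ihpw⟩

-- pvG is B's two enumerate-folds
lemma pvL3 (a b : Int → Int) : ∀ (xs : List Int) (t p1 p2 : Int), 0 ≤ t →
    pvG a b xs t p1 p2 =
      ((PySem.List.enumerate xs t).foldl (fun s p => if p.1 % 2 == 0 then s + a p.2 else s) p1,
       (PySem.List.enumerate xs t).foldl (fun s p => if p.1 % 2 == 1 then s + b p.2 else s) p2) := by
  intro xs
  induction xs with
  | nil => intro t p1 p2 _; simp [pvG, PySem.List.enumerate]
  | cons x xs ih =>
    intro t p1 p2 ht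
    rw [PySem.List.enumerate_cons]
    simp only [List.foldl_cons]
    rcases (by omega : t % 2 = 0 ∨ t % 2 = 1) with h | h
    · rw [show pvG a b (x :: xs) t p1 p2 = pvG a b xs (t + 1) (p1 + a x) p2 from by
        simp [pvG, h]]
      rw [ih (t + 1) _ _ (by omega)]
      refine congrArg₂ Prod.mk ?_ ?_ <;> · congr 1; simp [h]
    · rw [show pvG a b (x :: xs) t p1 p2 = pvG a b xs (t + 1) p1 (p2 + b x) from by
        simp [pvG, h]]
      rw [ih (t + 1) _ _ (by omega)]
      refine congrArg₂ Prod.mk ?_ ?_ <;> · congr 1; simp [h]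

lemma pvTake (A : List Int) (n : Int) (hle : n ≤ (A.length : Int)) :
    (PySem.List.pyRange 0 n).map (fun i => PySem.List.pyGetD A i 0) = A.take n.toNat := by
  apply List.ext_getElem
  · simp [PySem.List.length_pyRange_one]
    omega
  · intro k h1 h2
    simp only [List.getElem_map]
    rw [PySem.List.getElem_pyRange_one]
    have hk : k < A.length := by
      simp [PySem.List.length_pyRange_one] at h1
      omega
    rw [show ((0 : Int) + (k : Nat)) = ((k : Nat) : Int) by ring]
    rw [PySem.List.pyGetD_natCast, List.getD_eq_getElem _ _ hk, List.getElem_take]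

-- main glue: for 0 ≤ n within Pre_, A's final (P1, P2) equals B's two sums
lemma pvMain (n : Int) (A B : List Int) (hn : 0 ≤ n)
    (h1 : n ≤ (A.length : Int)) (h2 : n ≤ (B.length : Int)) :
    ((PySem.List.pyRange 0 n).foldl pvAStep
        ((PySem.List.pyRange 0 n).map
          (fun i => PySem.List.pyGetD A i 0 + PySem.List.pyGetD B i 0), A, B, 0, 0)).2.2.2
      = ((PySem.List.enumerate (PySem.List.sorted (PySem.List.pyRange 0 n) (pvKey A B)) 0).foldl
           (fun s p => if p.1 % 2 == 0 then s + PySem.List.pyGetD A p.2 0 else s) 0,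
         (PySem.List.enumerate (PySem.List.sorted (PySem.List.pyRange 0 n) (pvKey A B)) 0).foldl
           (fun s p => if p.1 % 2 == 1 then s + PySem.List.pyGetD B p.2 0 else s) 0) := by
  set a : Int → Int := fun i => PySem.List.pyGetD A i 0 with ha
  set b : Int → Int := fun i => PySem.List.pyGetD B i 0 with hb
  set c : Int → Int := fun i => a i + b i with hc
  set R : List Int := PySem.List.pyRange 0 n with hRdef
  have hRlen : R.length = n.toNat := by
    rw [hRdef, PySem.List.length_pyRange_one]; congr 1; omega
  have hApre : A = R.map a ++ A.drop n.toNat := by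
    rw [hRdef, ha, pvTake A n h1, List.take_append_drop]
  have hBpre : B = R.map b ++ B.drop n.toNat := by
    rw [hRdef, hb, pvTake B n h2, List.take_append_drop]
  have hcomb : R.map (fun i => PySem.List.pyGetD A i 0 + PySem.List.pyGetD B i 0) = R.map c := rfl
  have hfold : ((PySem.List.pyRange 0 n).foldl pvAStep
      (R.map c, R.map a ++ A.drop n.toNat, R.map b ++ B.drop n.toNat, 0, 0)).2.2.2
      = pvG a b (pvPick c n.toNat R) 0 0 0 := by
    have : PySem.List.pyRange 0 n = PySem.List.pyRange 0 (0 + (n.toNat : Int)) := by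
      congr 1; omega
    rw [this]
    exact pvL1 a b c n.toNat R (A.drop n.toNat) (B.drop n.toNat) 0 0 0 hRlen
  obtain ⟨hperm, hpw⟩ := pvL2 c n.toNat R hRlen (by rw [hRdef]; exact PySem.List.pairwise_lt_pyRange_one 0 n)
  have hsorted : PySem.List.sorted R (pvKeyOf c) = pvPick c n.toNat R :=
    PySem.List.sorted_eq_of_perm_of_pairwise_lt R (pvPick c n.toNat R) (pvKeyOf c) hperm hpw
  have hkey : pvKey A B = pvKeyOf c := by
    funext i; rfl
  conv_lhs => rw [hApre, hBpre]
  rw [hcomb, hfold, hkey, hsorted]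
  exact pvL3 a b (pvPick c n.toNat R) 0 0 0 le_rfl

-- ===== VERDICT (by name: the statement is the Claim_ definition above) =====
theorem determine_game_outcome_spec : Claim_equal_determine_game_outcome := by
  intro n A B hdom hpre
  unfold Spec_determine_game_outcome
  obtain ⟨h1, h2⟩ := hpre
  by_cases hn : 0 ≤ n
  · unfold determine_game_outcome determine_game_outcome_alt
    have h := pvMain n A B hn h1 h2
    simp only []
    rw [h]
  · have hempty : PySem.List.pyRange 0 n = [] := by
      have := PySem.List.length_pyRange_one 0 n
      cases h : PySem.List.pyRange 0 n with
      | nil => rfl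
      | cons x xs => rw [h] at this; simp at this; omega
    unfold determine_game_outcome determine_game_outcome_alt
    rw [hempty]
    simp [PySem.List.sorted]
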